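-- pv_equiv track=rewrite | github.com/luisfpatrocinio/beecrowd | bee_1024.py | deslocar_metade
-- ===== SOURCE A (Python) =====
-- def deslocar_metade(texto, deslocamento):
--     texto_deslocado = ""
--     for i in range(len(texto)):
--         letra = texto[i]
--         # Verificar se estamos na metade do texto (truncado)
--         if (i >= len(texto) // 2):
--             codigo = ord(letra) + deslocamento
--             letra = chr(codigo)
--         texto_deslocado += letra
--     return texto_deslocado
-- ===== SOURCE B (Python) =====
-- def deslocar_metade(texto, deslocamento):
--     half = len(texto) // 2
--     return texto[:half] + ''.join(chr(ord(c) + deslocamento) for c in texto[half:])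
-- ===== Notes on version B (the rewrite author's own statement) =====
-- stated objective: simpler
-- what changed: Replaces the index loop with a per-character position test and incremental string accumulation by a copied prefix slice plus one map/join over the suffix slice.
import Mathlib
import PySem

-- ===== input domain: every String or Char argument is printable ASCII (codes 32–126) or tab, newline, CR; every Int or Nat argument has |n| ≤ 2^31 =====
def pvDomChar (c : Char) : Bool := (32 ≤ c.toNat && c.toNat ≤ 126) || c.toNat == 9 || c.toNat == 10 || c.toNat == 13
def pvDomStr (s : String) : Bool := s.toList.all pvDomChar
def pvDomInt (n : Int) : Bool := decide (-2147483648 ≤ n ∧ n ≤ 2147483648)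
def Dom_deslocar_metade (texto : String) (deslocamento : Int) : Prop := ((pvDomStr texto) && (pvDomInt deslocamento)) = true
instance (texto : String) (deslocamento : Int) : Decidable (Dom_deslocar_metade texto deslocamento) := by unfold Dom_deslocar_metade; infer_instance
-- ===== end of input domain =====

-- B replaces A's index loop (per-character position test, quadratic string accumulation)
-- by prefix-slice copy + one map over the suffix slice (objective: simpler).

-- chr(code) for a code known (by Pre_) to be a valid non-surrogate scalar value
def pvChr (code : Int) : Char := Char.ofNat code.toNat

-- ===== PORT A =====
-- literal port of A: for i in range(len(texto)): shift char when i >= len//2, accumulate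
def deslocar_metade (texto : String) (deslocamento : Int) : String :=
  let cs := texto.toList
  let n := cs.length
  String.mk ((List.range n).foldl (fun acc i =>
    let letra := cs.getD i ' '
    let letra := if i ≥ n / 2 then pvChr ((letra.toNat : Int) + deslocamento) else letra
    acc ++ [letra]) [])

-- ===== PORT B =====
-- port of B: texto[:half] + ''.join(chr(ord(c)+deslocamento) for c in texto[half:])
def deslocar_metade_alt (texto : String) (deslocamento : Int) : String :=
  let cs := texto.toList
  let half := cs.length / 2
  String.mk ((PySem.List.slice cs none (some (half : Int))) ++
    (PySem.List.slice cs (some (half : Int)) none).map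
      (fun c => pvChr ((c.toNat : Int) + deslocamento)))

-- ===== PRECONDITION & SPEC =====
-- Pre_ excludes inputs where chr raises ValueError (shifted code outside 0..0x10FFFF) and —
-- although Python A returns a value there — inputs where a shifted code lands in the
-- surrogate range 0xD800..0xDFFF, since a lone surrogate is not representable as a Lean Char/String.
def Pre_deslocar_metade (texto : String) (deslocamento : Int) : Prop :=
  ((texto.toList.drop (texto.toList.length / 2)).all (fun c =>
    decide ((0 ≤ (c.toNat : Int) + deslocamento ∧ (c.toNat : Int) + deslocamento < 0xD800) ∨
            (0xE000 ≤ (c.toNat : Int) + deslocamento ∧ (c.toNat : Int) + deslocamento ≤ 0x10FFFF)))) = true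
instance (texto : String) (deslocamento : Int) : Decidable (Pre_deslocar_metade texto deslocamento) := by unfold Pre_deslocar_metade; infer_instance

def pvWitness_deslocar_metade : String × Int := ("abcd", 3)

def Spec_deslocar_metade (texto : String) (deslocamento : Int) (out : String) : Prop := out = deslocar_metade_alt texto deslocamento
instance (texto : String) (deslocamento : Int) (out : String) : Decidable (Spec_deslocar_metade texto deslocamento out) := by unfold Spec_deslocar_metade; infer_instance

-- ===== CLAIM (what is proved, stated in full; the proofs are below) =====
def Claim_equal_deslocar_metade : Prop := ∀ (texto : String) (deslocamento : Int), Dom_deslocar_metade texto deslocamento → Pre_deslocar_metade texto deslocamento → Spec_deslocar_metade texto deslocamento (deslocar_metade texto deslocamento)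

-- ===== LEMMAS AND PROOFS =====

-- A's loop written as a map over range, split at the midpoint, is B's take ++ map drop
theorem range_map_split {α : Type} (cs : List α) (d : α) (g : α → α) (h : Nat) (hh : h ≤ cs.length) :
    (List.range cs.length).map (fun i => if h ≤ i then g (cs.getD i d) else cs.getD i d)
      = cs.take h ++ (cs.drop h).map g := by
  apply List.ext_getElem
  · simp [Nat.min_eq_left hh]; omega
  · intro i hi1 hi2
    simp only [List.getElem_map, List.getElem_range]
    by_cases hc : h ≤ i
    · rw [List.getElem_append_right (by simp [Nat.min_eq_left hh]; omega)]
      simp only [List.getElem_map, List.getElem_drop]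
      have : i < cs.length := by simpa using hi1
      simp [hc, this, Nat.min_eq_left hh]
    · rw [List.getElem_append_left (by simp [Nat.min_eq_left hh]; omega)]
      have : i < cs.length := by simpa using hi1
      simp [hc, this]

theorem deslocar_metade_spec : Claim_equal_deslocar_metade := by
  intro texto deslocamento _ _
  unfold Spec_deslocar_metade deslocar_metade deslocar_metade_alt
  simp only [PySem.List.foldl_append_singleton_eq_map, List.nil_append, ge_iff_le]
  rw [PySem.List.slice_to _ (Int.natCast_nonneg _), PySem.List.slice_from _ (Int.natCast_nonneg _)]
  simp only [Int.toNat_natCast]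
  congr 1
  exact range_map_split texto.toList ' ' (fun c => pvChr ((c.toNat : Int) + deslocamento))
    (texto.toList.length / 2) (Nat.div_le_self _ _)
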